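-- pv_equiv track=rewrite | github.com/SimplyBenz/100-Days-of-Python | Day 00 - My Draft - For My Experiment/thai-id.py | validate_citizen_id
-- ===== SOURCE A (Python) =====
-- def validate_citizen_id(prefix):
--     def calculate_check_digit(number_str):
--         # คำนวณตามหลักเกณฑ์การตรวจสอบเลขบัตรประชาชน
--         weights = list(range(13, 1, -1))
--         total = sum(int(digit) * weight for digit, weight in zip(number_str, weights))
--         remainder = total % 11
--         check_digit = 11 - remainder if remainder != 0 else 0
--         return check_digit if check_digit < 10 else 0
--
--     # ลองทุกเลข 3 หลักสุดท้าย
--     valid_combinations = []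
--     for last_3_digits in range(1000):
--         full_number = f"{prefix}{last_3_digits:03d}"
--         if calculate_check_digit(full_number[:-1]) == int(full_number[-1]):
--             valid_combinations.append(last_3_digits)
--
--     return valid_combinations
-- ===== SOURCE B (Python) =====
-- def validate_citizen_id(prefix):
--     def calculate_check_digit(number_str):
--         # same check-digit rule as the original
--         weights = list(range(13, 1, -1))
--         total = sum(int(digit) * weight for digit, weight in zip(number_str, weights))
--         remainder = total % 11
--         check_digit = 11 - remainder if remainder != 0 else 0
--         return check_digit if check_digit < 10 else 0
--
--     # loop over the 100 leading pairs only: the check digit is always 0-9,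
--     # so each pair contributes exactly one valid 3-digit combination
--     valid_combinations = []
--     for pair in range(100):
--         d1, d2 = divmod(pair, 10)
--         c = calculate_check_digit(f"{prefix}{d1}{d2}")
--         valid_combinations.append(100 * d1 + 10 * d2 + c)
--     return valid_combinations
-- ===== Notes on version B (the rewrite author's own statement) =====
-- stated objective: faster
-- what changed: Instead of testing all 1000 last-3-digit candidates against the check digit, B loops over the 100 leading pairs only, computes the check digit once per pair, and emits 100*d1+10*d2+c directly (the check digit is always 0-9, so each pair yields exactly one valid combination).
import Mathlib
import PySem

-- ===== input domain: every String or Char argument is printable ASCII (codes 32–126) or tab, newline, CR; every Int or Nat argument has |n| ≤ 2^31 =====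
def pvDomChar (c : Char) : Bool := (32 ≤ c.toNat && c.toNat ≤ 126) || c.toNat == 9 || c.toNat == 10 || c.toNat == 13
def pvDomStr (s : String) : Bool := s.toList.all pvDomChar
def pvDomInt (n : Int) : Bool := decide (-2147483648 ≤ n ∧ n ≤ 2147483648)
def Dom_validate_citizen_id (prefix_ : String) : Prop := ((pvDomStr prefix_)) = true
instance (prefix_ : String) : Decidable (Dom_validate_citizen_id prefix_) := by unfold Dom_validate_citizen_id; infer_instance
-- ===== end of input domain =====

-- B enumerates only the 100 leading digit pairs and emits 100*d1+10*d2+check directly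
-- (the check digit is always 0-9), instead of A's filtering of all 1000 candidates.

-- ===== PORT A =====
-- int(c) for a single character (ValueError = none, defaulted; Pre_ admits digit chars only)
def pvIntOfChar (c : Char) : Int := (PySem.Int.ofChars? [c]).getD 0

-- calculate_check_digit: textually identical inner helper of A and of B, shared
def pvCheckDigit (s : List Char) : Int :=
  let weights := PySem.List.pyRange 13 1 (-1)
  let total := ((s.zip weights).map (fun dw => pvIntOfChar dw.1 * dw.2)).sum
  let remainder := PySem.Int.mod total 11
  let check_digit := if remainder ≠ 0 then 11 - remainder else 0
  if check_digit < 10 then check_digit else 0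

def validate_citizen_id (prefix_ : String) : List Int :=
  (PySem.List.pyRange 0 1000 1).foldl (fun acc n =>
    let full := prefix_.toList ++ PySem.Chars.zfill (PySem.Int.toChars n) 3   -- f"{prefix}{n:03d}"
    if pvCheckDigit (PySem.List.slice full none (some (-1)))
        = pvIntOfChar ((PySem.List.pyGet? full (-1)).getD ' ')
    then acc ++ [n] else acc) []

-- ===== PORT B =====
def validate_citizen_id_alt (prefix_ : String) : List Int :=
  (PySem.List.pyRange 0 100 1).foldl (fun acc pair =>
    let d1 := PySem.Int.floordiv pair 10
    let d2 := PySem.Int.mod pair 10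
    let c := pvCheckDigit (prefix_.toList ++ PySem.Int.toChars d1 ++ PySem.Int.toChars d2)
    acc ++ [100 * d1 + 10 * d2 + c]) []

-- ===== PRECONDITION & SPEC =====
-- Pre_ excludes exactly the inputs on which Python raises ValueError: a non-digit
-- character among the first 12 characters of the prefix reaches int() in both programs.
def Pre_validate_citizen_id (prefix_ : String) : Prop :=
  (prefix_.toList.take 12).all (fun c => c.isDigit) = true
instance (prefix_ : String) : Decidable (Pre_validate_citizen_id prefix_) := by
  unfold Pre_validate_citizen_id; infer_instance
def pvWitness_validate_citizen_id : String := "1234567890"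

def Spec_validate_citizen_id (prefix_ : String) (out : List Int) : Prop := out = validate_citizen_id_alt prefix_
instance (prefix_ : String) (out : List Int) : Decidable (Spec_validate_citizen_id prefix_ out) := by unfold Spec_validate_citizen_id; infer_instance

-- ===== CLAIM (what is proved, stated in full; the proofs are below) =====
def Claim_equal_validate_citizen_id : Prop := ∀ (prefix_ : String), Dom_validate_citizen_id prefix_ → Pre_validate_citizen_id prefix_ → Spec_validate_citizen_id prefix_ (validate_citizen_id prefix_)

-- ===== LEMMAS AND PROOFS =====

def pvDig (d : Nat) : Char := Char.ofNat (48 + d)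

def pvF (P : List Char) (k : Nat) : Int := pvCheckDigit (P ++ [pvDig (k / 10), pvDig (k % 10)])

def pvPA (P : List Char) (n : Nat) : Bool :=
  decide (pvCheckDigit (PySem.List.slice (P ++ PySem.Chars.zfill (PySem.Int.toChars (n : Int)) 3) none (some (-1)))
    = pvIntOfChar ((PySem.List.pyGet? (P ++ PySem.Chars.zfill (PySem.Int.toChars (n : Int)) 3) (-1)).getD ' '))

def pvCast (n : Nat) : Int := n

def pvGB (P : List Char) (k : Nat) : Int :=
  100 * PySem.Int.floordiv (k : Int) 10 + 10 * PySem.Int.mod (k : Int) 10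
    + pvCheckDigit (P ++ PySem.Int.toChars (PySem.Int.floordiv (k : Int) 10)
        ++ PySem.Int.toChars (PySem.Int.mod (k : Int) 10))

set_option maxRecDepth 8192 in
lemma pvRange1000 : PySem.List.pyRange 0 1000 1 = (List.range 1000).map pvCast := by
  exact_mod_cast PySem.List.pyRange_zero_natCast 1000

set_option maxRecDepth 8192 in
lemma pvRange100 : PySem.List.pyRange 0 100 1 = (List.range 100).map pvCast := by
  exact_mod_cast PySem.List.pyRange_zero_natCast 100

set_option maxRecDepth 40000 in
lemma pvZfill3 : ∀ n : Nat, n < 1000 → PySem.Chars.zfill (PySem.Int.toChars (n : Int)) 3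
    = [pvDig (n / 100), pvDig (n / 10 % 10), pvDig (n % 10)] := by decide

lemma pvIntOfDig : ∀ d : Nat, d < 10 → pvIntOfChar (pvDig d) = (d : Int) := by decide

lemma pvToCharsDig : ∀ d : Nat, d < 10 → PySem.Int.toChars ((d : Nat) : Int) = [pvDig d] := by decide

lemma pvCheckDigit_bounds (s : List Char) : 0 ≤ pvCheckDigit s ∧ pvCheckDigit s < 10 := by
  unfold pvCheckDigit
  dsimp only
  generalize ((s.zip (PySem.List.pyRange 13 1 (-1))).map (fun dw => pvIntOfChar dw.1 * dw.2)).sum = t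
  have h1 : 0 ≤ PySem.Int.mod t 11 := PySem.Int.mod_nonneg t (by norm_num)
  have h2 : PySem.Int.mod t 11 < 11 := PySem.Int.mod_lt t (by norm_num)
  split_ifs <;> omega

lemma pvCondA (P : List Char) (n : Nat) (hn : n < 1000) :
    (pvCheckDigit (PySem.List.slice (P ++ PySem.Chars.zfill (PySem.Int.toChars (n : Int)) 3) none (some (-1)))
      = pvIntOfChar ((PySem.List.pyGet? (P ++ PySem.Chars.zfill (PySem.Int.toChars (n : Int)) 3) (-1)).getD ' '))
    ↔ (pvF P (n / 10) = ((n % 10 : Nat) : Int)) := by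
  rw [pvZfill3 n hn, PySem.List.slice_to_neg_one,
    show P ++ [pvDig (n / 100), pvDig (n / 10 % 10), pvDig (n % 10)]
      = (P ++ [pvDig (n / 100), pvDig (n / 10 % 10)]) ++ [pvDig (n % 10)] by simp,
    List.dropLast_concat, PySem.List.pyGet?_neg_one_append_singleton, Option.getD_some,
    pvIntOfDig _ (by omega)]
  unfold pvF
  rw [show n / 10 / 10 = n / 100 by omega]

set_option maxRecDepth 40000 in
lemma pvA_eq (prefix_ : String) : validate_citizen_id prefix_
    = ((List.range 1000).filter
        (fun n : Nat => decide (pvF prefix_.toList (n / 10) = ((n % 10 : Nat) : Int)))).map pvCast := by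
  unfold validate_citizen_id
  rw [pvRange1000, List.foldl_map,
    List.foldl_ext _ (fun acc k => if pvPA prefix_.toList k = true then acc ++ [pvCast k] else acc) []
      (fun acc k _ => by dsimp only; exact if_congr (by simp [pvPA, pvCast]) rfl rfl),
    PySem.List.foldl_append_if, List.nil_append]
  congr 1
  apply List.filter_congr
  intro n hn
  simp only [pvPA]
  exact decide_eq_decide.mpr (pvCondA prefix_.toList n (List.mem_range.mp hn))

lemma pvBk (P : List Char) (k : Nat) (hk : k < 100) : pvGB P k = 10 * (k : Int) + pvF P k := by
  unfold pvGB
  have h1 : PySem.Int.floordiv (k : Int) 10 = ((k / 10 : Nat) : Int) := by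
    rw [PySem.Int.floordiv_eq_ediv_of_pos (by norm_num)]; omega
  have h2 : PySem.Int.mod (k : Int) 10 = ((k % 10 : Nat) : Int) := by
    rw [PySem.Int.mod_eq_emod_of_pos (by norm_num)]; omega
  rw [h1, h2, pvToCharsDig _ (by omega), pvToCharsDig _ (by omega)]
  unfold pvF
  rw [show P ++ [pvDig (k / 10)] ++ [pvDig (k % 10)] = P ++ [pvDig (k / 10), pvDig (k % 10)] by simp]
  push_cast
  omega

set_option maxRecDepth 40000 in
lemma pvB_eq (prefix_ : String) : validate_citizen_id_alt prefix_
    = (List.range 100).map (fun k : Nat => 10 * (k : Int) + pvF prefix_.toList k) := by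
  unfold validate_citizen_id_alt
  rw [pvRange100, List.foldl_map,
    List.foldl_ext _ (fun acc k => acc ++ [pvGB prefix_.toList k]) []
      (fun acc k _ => by dsimp only; rfl),
    PySem.List.foldl_append_singleton_eq_map, List.nil_append]
  apply List.map_congr_left
  intro k hk
  exact pvBk prefix_.toList k (List.mem_range.mp hk)

lemma pvMain (f : Nat → Int) (hf : ∀ k, 0 ≤ f k ∧ f k < 10) :
    ∀ m : Nat, ((List.range (10 * m)).filter
        (fun n : Nat => decide (f (n / 10) = ((n % 10 : Nat) : Int)))).map pvCast
      = (List.range m).map (fun k : Nat => 10 * (k : Int) + f k) := by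
  intro m
  induction m with
  | zero => simp
  | succ m ih =>
    rw [show 10 * (m + 1) = 10 * m + 10 by ring, List.range_add, List.filter_append,
      List.map_append, ih]
    conv_rhs => rw [List.range_succ, List.map_append]
    congr 1
    rw [List.filter_map, List.map_map]
    obtain ⟨h0, h9⟩ := hf m
    set t := (f m).toNat with ht
    have hft : f m = (t : Int) := by omega
    have hlt : t < 10 := by omega
    have hp : ∀ j ∈ List.range 10,
        ((fun n : Nat => decide (f (n / 10) = ((n % 10 : Nat) : Int))) ∘ (fun x => 10 * m + x)) j
        = decide (j = t) := by
      intro j hj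
      have hj10 : j < 10 := List.mem_range.mp hj
      simp only [Function.comp]
      rw [show (10 * m + j) / 10 = m by omega, show (10 * m + j) % 10 = j by omega, hft]
      simp [eq_comm]
    rw [List.filter_congr hp,
      show (List.range 10).filter (fun j => decide (j = t)) = [t] by interval_cases t <;> decide]
    simp only [List.map_cons, List.map_nil, Function.comp, pvCast]
    congr 1
    rw [hft]
    push_cast
    ring

-- ===== VERDICT (by name: the statement is the Claim_ definition above) =====
theorem validate_citizen_id_spec : Claim_equal_validate_citizen_id := by
  intro prefix_ _ _
  unfold Spec_validate_citizen_id
  rw [pvA_eq, pvB_eq]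
  have h := pvMain (pvF prefix_.toList) (fun k => pvCheckDigit_bounds _) 100
  simp only [show (10 * 100 : Nat) = 1000 from by norm_num] at h
  exact h
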